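-- pv_equiv track=rewrite | github.com/sonambharti/Python | Backtracking/gridIllumination.py | gridIllumination_optimal
-- ===== SOURCE A (Python) =====
-- from collections import defaultdict, Counter
--
-- def gridIllumination_optimal(n, lamps, queries):
--     # Maps to store the number of lamps in each row, column, and diagonal
--     row_map = defaultdict(int)
--     col_map = defaultdict(int)
--     pos_diag_map = defaultdict(int)
--     neg_diag_map = defaultdict(int)
--
--     # Set to track the positions of the active lamps
--     lamp_set = set()
--
--     # Initialize the lamp maps and lamp set
--     for r, c in lamps:
--         if (r, c) in lamp_set:
--             continue
--         lamp_set.add((r, c))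
--         row_map[r] += 1
--         col_map[c] += 1
--         pos_diag_map[r + c] += 1
--         neg_diag_map[r - c] += 1
--
--     # Directions to turn off adjacent lamps (including the lamp itself)
--     directions = [(0, 0), (-1, 0), (1, 0), (0, -1), (0, 1), (-1, -1), (-1, 1), (1, -1), (1, 1)]
--
--     result = []
--
--     for r, c in queries:
--         # Check if the current cell is illuminated
--         if row_map[r] > 0 or col_map[c] > 0 or pos_diag_map[r + c] > 0 or neg_diag_map[r - c] > 0:
--             result.append(1)  # The cell is illuminated
--         else:
--             result.append(0)  # The cell is not illuminated
--
--         # Turn off the lamp at (r, c) and its adjacent cells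
--         for dr, dc in directions:
--             nr, nc = r + dr, c + dc
--             if (nr, nc) in lamp_set:
--                 lamp_set.remove((nr, nc))
--                 row_map[nr] -= 1
--                 col_map[nc] -= 1
--                 pos_diag_map[nr + nc] -= 1
--                 neg_diag_map[nr - nc] -= 1
--
--     return result
-- ===== SOURCE B (Python) =====
-- def gridIllumination_optimal(n, lamps, queries):
--     # Single active-lamp set; illumination decided by a full scan of the
--     # active lamps instead of four incremental row/col/diagonal count maps.
--     active = set((r, c) for r, c in lamps)
--     result = []
--     for r, c in queries:
--         lit = any(lr == r or lc == c or lr + lc == r + c or lr - lc == r - c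
--                   for lr, lc in active)
--         result.append(1 if lit else 0)
--         # turn off every lamp in the 3x3 neighbourhood of the query cell
--         active = {(lr, lc) for (lr, lc) in active
--                   if abs(lr - r) > 1 or abs(lc - c) > 1}
--     return result
-- ===== Notes on version B (the rewrite author's own statement) =====
-- stated objective: simpler
-- what changed: Replaces A's four incremental row/column/diagonal count maps (updated on every insert and removal) with a single active-lamp set: each query is answered by scanning the active lamps for an alignment, and the 3x3 switch-off becomes one set comprehension with a Chebyshev-distance test instead of a nine-direction removal loop.
import Mathlib
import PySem

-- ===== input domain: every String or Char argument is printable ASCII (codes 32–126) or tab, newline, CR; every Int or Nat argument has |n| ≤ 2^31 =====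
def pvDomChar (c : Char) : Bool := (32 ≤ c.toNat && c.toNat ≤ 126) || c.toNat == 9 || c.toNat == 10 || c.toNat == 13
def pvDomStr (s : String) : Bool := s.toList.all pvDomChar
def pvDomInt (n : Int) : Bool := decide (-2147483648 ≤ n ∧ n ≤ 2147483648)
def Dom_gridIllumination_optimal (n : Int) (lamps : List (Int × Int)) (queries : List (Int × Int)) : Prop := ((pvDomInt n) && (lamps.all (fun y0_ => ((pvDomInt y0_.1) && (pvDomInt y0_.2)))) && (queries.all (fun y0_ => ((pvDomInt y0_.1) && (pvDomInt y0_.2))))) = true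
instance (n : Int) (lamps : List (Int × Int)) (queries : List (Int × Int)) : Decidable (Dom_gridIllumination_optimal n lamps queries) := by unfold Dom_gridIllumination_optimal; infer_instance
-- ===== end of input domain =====

-- B replaces A's four incremental row/column/diagonal count maps with a single
-- active-lamp set scanned per query (simpler decomposition, no speed claim).


-- ===== PORT A =====
-- A's state while building the lamp maps: (row_map, col_map, pos_diag_map, neg_diag_map, lamp_set)
-- defaultdict(int) lookups are ported as .getD k 0 / .modify k 0 f (the defaultdict's
-- key-inserting side effect never changes any looked-up value, so this is value-exact);
-- the guarded 'lamp_set.remove' is Set.discard, exact under the membership guard.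
def pvAInsert (st : PySem.Dict Int Int × PySem.Dict Int Int × PySem.Dict Int Int × PySem.Dict Int Int × PySem.Set (Int × Int))
    (rc : Int × Int) :
    PySem.Dict Int Int × PySem.Dict Int Int × PySem.Dict Int Int × PySem.Dict Int Int × PySem.Set (Int × Int) :=
  if PySem.Set.contains st.2.2.2.2 rc then st
  else (st.1.modify rc.1 0 (· + 1), st.2.1.modify rc.2 0 (· + 1),
        st.2.2.1.modify (rc.1 + rc.2) 0 (· + 1), st.2.2.2.1.modify (rc.1 - rc.2) 0 (· + 1),
        PySem.Set.add st.2.2.2.2 rc)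

def pvARemove (q : Int × Int)
    (st : PySem.Dict Int Int × PySem.Dict Int Int × PySem.Dict Int Int × PySem.Dict Int Int × PySem.Set (Int × Int))
    (d : Int × Int) :
    PySem.Dict Int Int × PySem.Dict Int Int × PySem.Dict Int Int × PySem.Dict Int Int × PySem.Set (Int × Int) :=
  if PySem.Set.contains st.2.2.2.2 (q.1 + d.1, q.2 + d.2) then
    (st.1.modify (q.1 + d.1) 0 (· - 1), st.2.1.modify (q.2 + d.2) 0 (· - 1),
     st.2.2.1.modify ((q.1 + d.1) + (q.2 + d.2)) 0 (· - 1),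
     st.2.2.2.1.modify ((q.1 + d.1) - (q.2 + d.2)) 0 (· - 1),
     PySem.Set.discard st.2.2.2.2 (q.1 + d.1, q.2 + d.2))
  else st

def pvADirections : List (Int × Int) :=
  [(0, 0), (-1, 0), (1, 0), (0, -1), (0, 1), (-1, -1), (-1, 1), (1, -1), (1, 1)]

def pvAQuery
    (st : PySem.Dict Int Int × PySem.Dict Int Int × PySem.Dict Int Int × PySem.Dict Int Int × PySem.Set (Int × Int) × List Int)
    (q : Int × Int) :
    PySem.Dict Int Int × PySem.Dict Int Int × PySem.Dict Int Int × PySem.Dict Int Int × PySem.Set (Int × Int) × List Int :=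
  let result :=
    if st.1.getD q.1 0 > 0 ∨ st.2.1.getD q.2 0 > 0 ∨ st.2.2.1.getD (q.1 + q.2) 0 > 0 ∨ st.2.2.2.1.getD (q.1 - q.2) 0 > 0
    then st.2.2.2.2.2 ++ [(1 : Int)] else st.2.2.2.2.2 ++ [(0 : Int)]
  let st' := pvADirections.foldl (pvARemove q) (st.1, st.2.1, st.2.2.1, st.2.2.2.1, st.2.2.2.2.1)
  (st'.1, st'.2.1, st'.2.2.1, st'.2.2.2.1, st'.2.2.2.2, result)

def gridIllumination_optimal (n : Int) (lamps : List (Int × Int)) (queries : List (Int × Int)) : List Int :=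
  let init := lamps.foldl pvAInsert
    (PySem.Dict.empty, PySem.Dict.empty, PySem.Dict.empty, PySem.Dict.empty, PySem.Set.empty)
  let final := queries.foldl pvAQuery
    (init.1, init.2.1, init.2.2.1, init.2.2.2.1, init.2.2.2.2, ([] : List Int))
  final.2.2.2.2.2

-- ===== PORT B =====
-- B's per-query step: scan the active lamps for an alignment, then keep only the
-- lamps outside the 3x3 neighbourhood of the query cell (a set comprehension in Source B;
-- the 'any' scan and the comprehension consume the set order-independently).
def pvBQuery (st : PySem.Set (Int × Int) × List Int) (q : Int × Int) :
    PySem.Set (Int × Int) × List Int :=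
  let lit := st.1.any (fun l => l.1 == q.1 || l.2 == q.2 || l.1 + l.2 == q.1 + q.2 || l.1 - l.2 == q.1 - q.2)
  (st.1.filter (fun l => decide (1 < (l.1 - q.1).natAbs) || decide (1 < (l.2 - q.2).natAbs)),
   st.2 ++ [if lit then (1 : Int) else 0])

def gridIllumination_optimal_alt (n : Int) (lamps : List (Int × Int)) (queries : List (Int × Int)) : List Int :=
  (queries.foldl pvBQuery (PySem.Set.ofList lamps, ([] : List Int))).2

-- ===== PRECONDITION & SPEC =====
def Spec_gridIllumination_optimal (n : Int) (lamps : List (Int × Int)) (queries : List (Int × Int)) (out : List Int) : Prop := out = gridIllumination_optimal_alt n lamps queries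
instance (n : Int) (lamps : List (Int × Int)) (queries : List (Int × Int)) (out : List Int) : Decidable (Spec_gridIllumination_optimal n lamps queries out) := by unfold Spec_gridIllumination_optimal; infer_instance

-- ===== CLAIM (what is proved, stated in full; the proofs are below) =====
def Claim_equal_gridIllumination_optimal : Prop := ∀ (n : Int) (lamps : List (Int × Int)) (queries : List (Int × Int)), Dom_gridIllumination_optimal n lamps queries → Spec_gridIllumination_optimal n lamps queries (gridIllumination_optimal n lamps queries)

-- ===== LEMMAS AND PROOFS =====

-- The loop invariant: each of A's four maps counts, for every key, the active lamps
-- in that row / column / diagonal.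
def pvCounts (rm cm pm nm : PySem.Dict Int Int) (ls : List (Int × Int)) : Prop :=
  ∀ k : Int,
    rm.getD k 0 = (ls.countP (fun l => l.1 == k) : Int) ∧
    cm.getD k 0 = (ls.countP (fun l => l.2 == k) : Int) ∧
    pm.getD k 0 = (ls.countP (fun l => l.1 + l.2 == k) : Int) ∧
    nm.getD k 0 = (ls.countP (fun l => l.1 - l.2 == k) : Int)

theorem pvDiscard_of_contains_false (s : PySem.Set (Int × Int)) (x : Int × Int)
    (hc : PySem.Set.contains s x = false) : PySem.Set.discard s x = s := by
  have hm : x ∉ s := by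
    intro hmem
    have := (PySem.Set.contains_iff s x).mpr hmem
    simp_all
  unfold PySem.Set.discard
  apply List.filter_eq_self.mpr
  intro a ha
  simp only [Bool.not_eq_eq_eq_not, Bool.not_true, beq_eq_false_iff_ne, ne_eq]
  rintro rfl
  exact hm ha

theorem pvCountP_discard (ls : List (Int × Int)) (x : Int × Int) (p : (Int × Int) → Bool)
    (hnd : ls.Nodup) (hx : x ∈ ls) :
    ((PySem.Set.discard ls x).countP p : Int) = (ls.countP p : Int) - (if p x then 1 else 0) := by
  have hdf : PySem.Set.discard ls x = ls.erase x := by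
    rw [List.Nodup.erase_eq_filter hnd]
    unfold PySem.Set.discard
    apply List.filter_congr
    intro a _
    simp [bne]
  rw [hdf, List.countP_erase]
  by_cases hp : p x = true
  · have h1 : 0 < ls.countP p := List.countP_pos_iff.mpr ⟨x, hx, hp⟩
    simp only [hx, hp, and_self, if_true]
    omega
  · simp [hp]

theorem pvCounts_append (rm cm pm nm : PySem.Dict Int Int) (ls : List (Int × Int)) (rc : Int × Int)
    (h : pvCounts rm cm pm nm ls) :
    pvCounts (rm.modify rc.1 0 (· + 1)) (cm.modify rc.2 0 (· + 1))
             (pm.modify (rc.1 + rc.2) 0 (· + 1)) (nm.modify (rc.1 - rc.2) 0 (· + 1))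
             (ls ++ [rc]) := by
  intro k
  obtain ⟨h1, h2, h3, h4⟩ := h k
  refine ⟨?_, ?_, ?_, ?_⟩
  · rw [PySem.Dict.getD_modify, List.countP_append]
    by_cases hk : k = rc.1
    · simp [hk, (h rc.1).1]
    · simp [hk, Ne.symm hk, h1]
  · rw [PySem.Dict.getD_modify, List.countP_append]
    by_cases hk : k = rc.2
    · simp [hk, (h rc.2).2.1]
    · simp [hk, Ne.symm hk, h2]
  · rw [PySem.Dict.getD_modify, List.countP_append]
    by_cases hk : k = rc.1 + rc.2
    · simp [hk, (h (rc.1 + rc.2)).2.2.1]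
    · simp [hk, Ne.symm hk, h3]
  · rw [PySem.Dict.getD_modify, List.countP_append]
    by_cases hk : k = rc.1 - rc.2
    · simp [hk, (h (rc.1 - rc.2)).2.2.2]
    · simp [hk, Ne.symm hk, h4]

theorem pvInit_inv (lamps : List (Int × Int))
    (rm cm pm nm : PySem.Dict Int Int) (ls : PySem.Set (Int × Int))
    (h : pvCounts rm cm pm nm ls) :
    (lamps.foldl pvAInsert (rm, cm, pm, nm, ls)).2.2.2.2 = lamps.foldl PySem.Set.add ls ∧
    pvCounts (lamps.foldl pvAInsert (rm, cm, pm, nm, ls)).1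
             (lamps.foldl pvAInsert (rm, cm, pm, nm, ls)).2.1
             (lamps.foldl pvAInsert (rm, cm, pm, nm, ls)).2.2.1
             (lamps.foldl pvAInsert (rm, cm, pm, nm, ls)).2.2.2.1
             (lamps.foldl pvAInsert (rm, cm, pm, nm, ls)).2.2.2.2 := by
  induction lamps generalizing rm cm pm nm ls with
  | nil => exact ⟨rfl, h⟩
  | cons rc rest ih =>
    simp only [List.foldl_cons]
    by_cases hc : PySem.Set.contains ls rc = true
    · have hmem : rc ∈ ls := (PySem.Set.contains_iff _ _).mp hc
      have hadd : PySem.Set.add ls rc = ls := PySem.Set.add_of_mem hmem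
      unfold pvAInsert
      simp only [hc, if_true, hadd]
      exact ih rm cm pm nm ls h
    · have hmem : rc ∉ ls := fun hm => by
        have := (PySem.Set.contains_iff ls rc).mpr hm
        simp_all
      have hadd : PySem.Set.add ls rc = ls ++ [rc] := PySem.Set.add_of_not_mem hmem
      unfold pvAInsert
      simp only [hc, Bool.false_eq_true, if_false, hadd]
      exact ih _ _ _ _ _ (by simpa [hadd] using pvCounts_append rm cm pm nm ls rc h)

theorem pvARemove_set (q : Int × Int)
    (st : PySem.Dict Int Int × PySem.Dict Int Int × PySem.Dict Int Int × PySem.Dict Int Int × PySem.Set (Int × Int))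
    (d : Int × Int) :
    (pvARemove q st d).2.2.2.2 = PySem.Set.discard st.2.2.2.2 (q.1 + d.1, q.2 + d.2) := by
  unfold pvARemove
  by_cases hc : PySem.Set.contains st.2.2.2.2 (q.1 + d.1, q.2 + d.2) = true
  · simp only [hc, if_true]
  · simp only [Bool.not_eq_true] at hc
    simp only [hc, Bool.false_eq_true, if_false]
    exact (pvDiscard_of_contains_false _ _ hc).symm

theorem pvARemove_inv (q : Int × Int)
    (st : PySem.Dict Int Int × PySem.Dict Int Int × PySem.Dict Int Int × PySem.Dict Int Int × PySem.Set (Int × Int))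
    (d : Int × Int) (hnd : st.2.2.2.2.Nodup)
    (h : pvCounts st.1 st.2.1 st.2.2.1 st.2.2.2.1 st.2.2.2.2) :
    pvCounts (pvARemove q st d).1 (pvARemove q st d).2.1 (pvARemove q st d).2.2.1
             (pvARemove q st d).2.2.2.1 (pvARemove q st d).2.2.2.2 := by
  obtain ⟨rm, cm, pm, nm, ls⟩ := st
  unfold pvARemove
  by_cases hc : PySem.Set.contains ls (q.1 + d.1, q.2 + d.2) = true
  · have hx : (q.1 + d.1, q.2 + d.2) ∈ ls := (PySem.Set.contains_iff _ _).mp hc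
    simp only [hc, if_true]
    intro k
    obtain ⟨h1, h2, h3, h4⟩ := h k
    simp only at h1 h2 h3 h4 ⊢
    refine ⟨?_, ?_, ?_, ?_⟩
    · rw [PySem.Dict.getD_modify, pvCountP_discard ls _ _ hnd hx, h1]
      by_cases hk : k = q.1 + d.1
      · simp [hk, (h (q.1 + d.1)).1]
      · simp [hk, Ne.symm hk]
    · rw [PySem.Dict.getD_modify, pvCountP_discard ls _ _ hnd hx, h2]
      by_cases hk : k = q.2 + d.2
      · simp [hk, (h (q.2 + d.2)).2.1]
      · simp [hk, Ne.symm hk]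
    · rw [PySem.Dict.getD_modify, pvCountP_discard ls _ _ hnd hx, h3]
      by_cases hk : k = (q.1 + d.1) + (q.2 + d.2)
      · simp [hk, (h ((q.1 + d.1) + (q.2 + d.2))).2.2.1]
      · simp [hk, Ne.symm hk]
    · rw [PySem.Dict.getD_modify, pvCountP_discard ls _ _ hnd hx, h4]
      by_cases hk : k = (q.1 + d.1) - (q.2 + d.2)
      · simp [hk, (h ((q.1 + d.1) - (q.2 + d.2))).2.2.2]
      · simp [hk, Ne.symm hk]
  · simp only [Bool.not_eq_true] at hc
    simp only [hc, Bool.false_eq_true, if_false]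
    exact h

theorem pvRemoveFold_inv (q : Int × Int) (ds : List (Int × Int))
    (st : PySem.Dict Int Int × PySem.Dict Int Int × PySem.Dict Int Int × PySem.Dict Int Int × PySem.Set (Int × Int))
    (hnd : st.2.2.2.2.Nodup)
    (h : pvCounts st.1 st.2.1 st.2.2.1 st.2.2.2.1 st.2.2.2.2) :
    (ds.foldl (pvARemove q) st).2.2.2.2
      = ds.foldl (fun (s : PySem.Set (Int × Int)) d => PySem.Set.discard s (q.1 + d.1, q.2 + d.2)) st.2.2.2.2 ∧
    (ds.foldl (pvARemove q) st).2.2.2.2.Nodup ∧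
    pvCounts (ds.foldl (pvARemove q) st).1 (ds.foldl (pvARemove q) st).2.1
             (ds.foldl (pvARemove q) st).2.2.1 (ds.foldl (pvARemove q) st).2.2.2.1
             (ds.foldl (pvARemove q) st).2.2.2.2 := by
  induction ds generalizing st with
  | nil => exact ⟨rfl, hnd, h⟩
  | cons d rest ih =>
    simp only [List.foldl_cons]
    have hset := pvARemove_set q st d
    have hnd' : (pvARemove q st d).2.2.2.2.Nodup := by
      rw [hset]; exact PySem.Set.nodup_discard _ _ hnd
    have h' := pvARemove_inv q st d hnd h
    obtain ⟨e1, e2, e3⟩ := ih (pvARemove q st d) hnd' h'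
    exact ⟨by rw [e1, hset], e2, e3⟩

-- the nine sequential discards are B's single Chebyshev filter
theorem pvDiscards_eq_filter (q : Int × Int) (ls : PySem.Set (Int × Int)) :
    pvADirections.foldl (fun (s : PySem.Set (Int × Int)) d => PySem.Set.discard s (q.1 + d.1, q.2 + d.2)) ls
      = ls.filter (fun l => decide (1 < (l.1 - q.1).natAbs) || decide (1 < (l.2 - q.2).natAbs)) := by
  unfold pvADirections
  simp only [List.foldl_cons, List.foldl_nil, PySem.Set.discard, List.filter_filter]
  apply List.filter_congr
  intro x _
  obtain ⟨a, b⟩ := x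
  rw [Bool.eq_iff_iff]
  simp only [Bool.and_eq_true, Bool.not_eq_true', beq_eq_false_iff_ne, ne_eq, Prod.mk.injEq,
    not_and, Bool.or_eq_true, decide_eq_true_eq]
  omega

-- A's four count lookups say "illuminated" exactly when B's scan finds an aligned lamp
theorem pvLit_eq (q : Int × Int) (rm cm pm nm : PySem.Dict Int Int) (ls : PySem.Set (Int × Int))
    (h : pvCounts rm cm pm nm ls) :
    (rm.getD q.1 0 > 0 ∨ cm.getD q.2 0 > 0 ∨ pm.getD (q.1 + q.2) 0 > 0 ∨ nm.getD (q.1 - q.2) 0 > 0)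
      ↔ ls.any (fun l => l.1 == q.1 || l.2 == q.2 || l.1 + l.2 == q.1 + q.2 || l.1 - l.2 == q.1 - q.2) = true := by
  rw [(h q.1).1, (h q.2).2.1, (h (q.1 + q.2)).2.2.1, (h (q.1 - q.2)).2.2.2]
  simp only [gt_iff_lt, Int.natCast_pos, List.countP_pos_iff, List.any_eq_true, Bool.or_eq_true]
  constructor
  · rintro (⟨x, hx, hp⟩ | ⟨x, hx, hp⟩ | ⟨x, hx, hp⟩ | ⟨x, hx, hp⟩)
    · exact ⟨x, hx, Or.inl (Or.inl (Or.inl hp))⟩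
    · exact ⟨x, hx, Or.inl (Or.inl (Or.inr hp))⟩
    · exact ⟨x, hx, Or.inl (Or.inr hp)⟩
    · exact ⟨x, hx, Or.inr hp⟩
  · rintro ⟨x, hx, ((hp | hp) | hp) | hp⟩
    · exact Or.inl ⟨x, hx, hp⟩
    · exact Or.inr (Or.inl ⟨x, hx, hp⟩)
    · exact Or.inr (Or.inr (Or.inl ⟨x, hx, hp⟩))
    · exact Or.inr (Or.inr (Or.inr ⟨x, hx, hp⟩))

theorem pvQueryFold (queries : List (Int × Int))
    (rm cm pm nm : PySem.Dict Int Int) (ls : PySem.Set (Int × Int)) (res : List Int)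
    (hnd : ls.Nodup) (h : pvCounts rm cm pm nm ls) :
    (queries.foldl pvAQuery (rm, cm, pm, nm, ls, res)).2.2.2.2.2
      = (queries.foldl pvBQuery (ls, res)).2 := by
  induction queries generalizing rm cm pm nm ls res with
  | nil => rfl
  | cons q rest ih =>
    simp only [List.foldl_cons]
    have hbit :
        (if rm.getD q.1 0 > 0 ∨ cm.getD q.2 0 > 0 ∨ pm.getD (q.1 + q.2) 0 > 0 ∨ nm.getD (q.1 - q.2) 0 > 0
         then res ++ [(1 : Int)] else res ++ [(0 : Int)])
        = res ++ [if ls.any (fun l => l.1 == q.1 || l.2 == q.2 || l.1 + l.2 == q.1 + q.2 || l.1 - l.2 == q.1 - q.2)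
                   then (1 : Int) else 0] := by
      by_cases hlit : rm.getD q.1 0 > 0 ∨ cm.getD q.2 0 > 0 ∨ pm.getD (q.1 + q.2) 0 > 0 ∨ nm.getD (q.1 - q.2) 0 > 0
      · rw [if_pos hlit, ((pvLit_eq q rm cm pm nm ls h).mp hlit : _ = true)]
        simp
      · rw [if_neg hlit]
        have : ls.any (fun l => l.1 == q.1 || l.2 == q.2 || l.1 + l.2 == q.1 + q.2 || l.1 - l.2 == q.1 - q.2) = false := by
          rcases hb : ls.any (fun l => l.1 == q.1 || l.2 == q.2 || l.1 + l.2 == q.1 + q.2 || l.1 - l.2 == q.1 - q.2)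
          · rfl
          · exact absurd ((pvLit_eq q rm cm pm nm ls h).mpr hb) hlit
        rw [this]
        simp
    obtain ⟨e1, e2, e3⟩ := pvRemoveFold_inv q pvADirections (rm, cm, pm, nm, ls) hnd h
    rw [pvDiscards_eq_filter] at e1
    have hA : pvAQuery (rm, cm, pm, nm, ls, res) q
        = ((pvADirections.foldl (pvARemove q) (rm, cm, pm, nm, ls)).1,
           (pvADirections.foldl (pvARemove q) (rm, cm, pm, nm, ls)).2.1,
           (pvADirections.foldl (pvARemove q) (rm, cm, pm, nm, ls)).2.2.1,
           (pvADirections.foldl (pvARemove q) (rm, cm, pm, nm, ls)).2.2.2.1,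
           (pvADirections.foldl (pvARemove q) (rm, cm, pm, nm, ls)).2.2.2.2,
           res ++ [if ls.any (fun l => l.1 == q.1 || l.2 == q.2 || l.1 + l.2 == q.1 + q.2 || l.1 - l.2 == q.1 - q.2)
                    then (1 : Int) else 0]) := by
      unfold pvAQuery
      simp only at hbit ⊢
      rw [hbit]
    have hB : pvBQuery (ls, res) q
        = (ls.filter (fun l => decide (1 < (l.1 - q.1).natAbs) || decide (1 < (l.2 - q.2).natAbs)),
           res ++ [if ls.any (fun l => l.1 == q.1 || l.2 == q.2 || l.1 + l.2 == q.1 + q.2 || l.1 - l.2 == q.1 - q.2)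
                    then (1 : Int) else 0]) := rfl
    rw [hA, hB]
    have := ih (pvADirections.foldl (pvARemove q) (rm, cm, pm, nm, ls)).1
               (pvADirections.foldl (pvARemove q) (rm, cm, pm, nm, ls)).2.1
               (pvADirections.foldl (pvARemove q) (rm, cm, pm, nm, ls)).2.2.1
               (pvADirections.foldl (pvARemove q) (rm, cm, pm, nm, ls)).2.2.2.1
               (pvADirections.foldl (pvARemove q) (rm, cm, pm, nm, ls)).2.2.2.2
               (res ++ [if ls.any (fun l => l.1 == q.1 || l.2 == q.2 || l.1 + l.2 == q.1 + q.2 || l.1 - l.2 == q.1 - q.2)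
                         then (1 : Int) else 0]) e2 e3
    rw [this, e1]

-- ===== VERDICT (by name: the statement is the Claim_ definition above) =====
theorem gridIllumination_optimal_spec : Claim_equal_gridIllumination_optimal := by
  intro n lamps queries _
  unfold Spec_gridIllumination_optimal gridIllumination_optimal gridIllumination_optimal_alt
  obtain ⟨hset, hcnt⟩ := pvInit_inv lamps PySem.Dict.empty PySem.Dict.empty PySem.Dict.empty
    PySem.Dict.empty PySem.Set.empty (by intro k; simp [PySem.Dict.getD_empty])
  have hofl : (lamps.foldl pvAInsert
      (PySem.Dict.empty, PySem.Dict.empty, PySem.Dict.empty, PySem.Dict.empty, PySem.Set.empty)).2.2.2.2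
      = PySem.Set.ofList lamps := by
    rw [hset, PySem.Set.ofList_eq_foldl]
    rfl
  have hnd : (lamps.foldl pvAInsert
      (PySem.Dict.empty, PySem.Dict.empty, PySem.Dict.empty, PySem.Dict.empty, PySem.Set.empty)).2.2.2.2.Nodup := by
    rw [hofl]; exact PySem.Set.nodup_ofList lamps
  simp only
  rw [pvQueryFold queries _ _ _ _ _ [] hnd hcnt, hofl]
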